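-- pv_equiv track=rewrite | github.com/bstoney/crispy-journey | advent-of-code/python/src/adventofcode/day01/day01.py | step
-- ===== SOURCE A (Python) =====
-- def step(current, direction, distance):
--     rotations = 0
--     for i in range(distance):
--         current += direction
--         current %= 100
--         if current == 0:
--             rotations += 1
--
--     return current, rotations
-- ===== SOURCE B (Python) =====
-- def step(current, direction, distance):
--     # Closed-form position plus period-100 rotation counting: O(1) instead of O(distance).
--     if distance <= 0:
--         return current, 0
--     q, r = divmod(distance, 100)
--     per = 0
--     for i in range(1, 101):
--         if (current + direction * i) % 100 == 0:
--             per += 1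
--     part = 0
--     for i in range(1, r + 1):
--         if (current + direction * i) % 100 == 0:
--             part += 1
--     return (current + direction * distance) % 100, q * per + part
-- ===== Notes on version B (the rewrite author's own statement) =====
-- stated objective: faster
-- what changed: Replaces the step-by-step simulation loop over the whole distance by the closed-form final position (current + direction*distance) % 100 and counts zero-crossings by exploiting the period-100 pattern: count zeros in one 100-step period plus a partial prefix, so at most 200 loop iterations regardless of distance.
import Mathlib
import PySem

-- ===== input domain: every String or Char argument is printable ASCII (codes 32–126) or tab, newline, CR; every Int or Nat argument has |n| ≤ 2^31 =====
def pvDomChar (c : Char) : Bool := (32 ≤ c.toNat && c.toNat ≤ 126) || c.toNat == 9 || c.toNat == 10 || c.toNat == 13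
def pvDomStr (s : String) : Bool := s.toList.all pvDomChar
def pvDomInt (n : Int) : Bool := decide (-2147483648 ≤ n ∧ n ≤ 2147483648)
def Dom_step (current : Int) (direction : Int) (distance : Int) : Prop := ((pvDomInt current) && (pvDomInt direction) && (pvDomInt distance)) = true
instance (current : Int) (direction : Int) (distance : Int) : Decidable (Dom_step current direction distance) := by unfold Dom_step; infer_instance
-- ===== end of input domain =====

-- B replaces A's O(distance) simulation by the closed-form final position and
-- period-100 zero-crossing counting (objective: faster, asymptotic).


-- ===== PORT A =====
-- Literal port: loop over range(distance) carrying (current, rotations).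
def step (current : Int) (direction : Int) (distance : Int) : List Int :=
  let res := (PySem.List.pyRange 0 distance 1).foldl
    (fun (st : Int × Int) _ =>
      let c := PySem.Int.mod (st.1 + direction) 100
      (c, if c = 0 then st.2 + 1 else st.2))
    (current, 0)
  [res.1, res.2]

-- ===== PORT B =====
-- the ascending counting loop 'for i in range(1, j+1): if (current + direction*i) % 100 == 0: cnt += 1'
def countZeros (current : Int) (direction : Int) : Nat → Int
  | 0 => 0
  | j + 1 => countZeros current direction j +
      (if PySem.Int.mod (current + direction * ((j : Int) + 1)) 100 = 0 then 1 else 0)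

def step_alt (current : Int) (direction : Int) (distance : Int) : List Int :=
  if distance ≤ 0 then [current, 0]
  else
    let q := PySem.Int.floordiv distance 100
    let r := PySem.Int.mod distance 100
    let per := countZeros current direction 100
    let part := countZeros current direction r.toNat
    [PySem.Int.mod (current + direction * distance) 100, q * per + part]

-- ===== PRECONDITION & SPEC =====
def Spec_step (current : Int) (direction : Int) (distance : Int) (out : List Int) : Prop := out = step_alt current direction distance
instance (current : Int) (direction : Int) (distance : Int) (out : List Int) : Decidable (Spec_step current direction distance out) := by unfold Spec_step; infer_instance

-- ===== CLAIM (what is proved, stated in full; the proofs are below) =====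
def Claim_equal_step : Prop := ∀ (current : Int) (direction : Int) (distance : Int), Dom_step current direction distance → Spec_step current direction distance (step current direction distance)

-- ===== LEMMAS AND PROOFS =====

-- A's loop as a Nat recursion on the number of steps
def itN (current d : Int) : Nat → Int × Int
  | 0 => (current, 0)
  | n + 1 =>
    let st := itN current d n
    let c := PySem.Int.mod (st.1 + d) 100
    (c, if c = 0 then st.2 + 1 else st.2)

theorem foldl_eq_itN (current d : Int) (n : Nat) :
    (PySem.List.pyRange 0 (n : Int) 1).foldl
      (fun (st : Int × Int) _ =>
        let c := PySem.Int.mod (st.1 + d) 100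
        (c, if c = 0 then st.2 + 1 else st.2))
      (current, 0) = itN current d n := by
  induction n with
  | zero => simp [PySem.List.pyRange_one_eq_nil, itN]
  | succ k ih =>
    rw [show ((k + 1 : Nat) : Int) = (k : Int) + 1 by push_cast; ring,
        PySem.List.pyRange_one_succ_right (by positivity),
        List.foldl_append, ih]
    simp [itN]

theorem itN_eq (current d : Int) (n : Nat) :
    itN current d n =
      ((if n = 0 then current else (current + d * n) % 100), countZeros current d n) := by
  induction n with
  | zero => simp [itN, countZeros]
  | succ k ih =>
    have h100 : (0 : Int) < 100 := by norm_num
    simp only [itN, ih, countZeros, PySem.Int.mod_eq_emod_of_pos h100]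
    rcases Nat.eq_zero_or_pos k with hk | hk
    · subst hk
      simp only [Nat.succ_ne_zero, if_false, Prod.mk.injEq]
      have hfst : (current + d) % 100 = (current + d * ((0 : Nat) + 1 : Int)) % 100 := by
        norm_num
      refine ⟨by push_cast; push_cast at hfst; exact hfst, ?_⟩
      rw [← hfst]
      split_ifs <;> simp [countZeros]
    · have hfst : ((current + d * (k : Int)) % 100 + d) % 100
          = (current + d * ((k : Int) + 1)) % 100 := by
        rw [Int.emod_add_emod]; congr 1; ring
      simp only [hk.ne', if_false, Nat.succ_ne_zero, Prod.mk.injEq]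
      constructor
      · push_cast; push_cast at hfst; exact hfst
      · rw [hfst]; split_ifs <;> ring

theorem countZeros_period (current d : Int) (m : Nat) :
    countZeros current d (m + 100) = countZeros current d m + countZeros current d 100 := by
  induction m with
  | zero => simp [countZeros]
  | succ k ih =>
    have h : k + 1 + 100 = (k + 100) + 1 := by omega
    rw [h]
    show countZeros current d (k + 100) + _ = _
    rw [ih]
    have hind : PySem.Int.mod (current + d * (((k + 100 : Nat) : Int) + 1)) 100
        = PySem.Int.mod (current + d * ((k : Int) + 1)) 100 := by
      have : current + d * (((k + 100 : Nat) : Int) + 1)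
          = (current + d * ((k : Int) + 1)) + d * 100 := by push_cast; ring
      rw [this, PySem.Int.mod_eq_emod_of_pos (by norm_num),
          PySem.Int.mod_eq_emod_of_pos (by norm_num), Int.add_mul_emod_self_right]
    rw [hind]
    show _ = countZeros current d (k + 1) + countZeros current d 100
    rw [show countZeros current d (k + 1)
        = countZeros current d k + (if PySem.Int.mod (current + d * ((k : Int) + 1)) 100 = 0 then 1 else 0) from rfl]
    ring

theorem countZeros_decompose (current d : Int) (q r : Nat) :
    countZeros current d (100 * q + r)
      = (q : Int) * countZeros current d 100 + countZeros current d r := by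
  induction q with
  | zero => simp
  | succ k ih =>
    have h : 100 * (k + 1) + r = (100 * k + r) + 100 := by ring
    rw [h, countZeros_period, ih]
    push_cast; ring

-- ===== VERDICT (by name: the statement is the Claim_ definition above) =====
theorem step_spec : Claim_equal_step := by
  intro current d distance _
  show step current d distance = step_alt current d distance
  unfold step step_alt
  by_cases hle : distance ≤ 0
  · simp [PySem.List.pyRange_one_eq_nil hle, hle]
  ·
    have hpos : 0 < distance := by omega
    have hn : distance = ((distance.toNat : Nat) : Int) := (Int.toNat_of_nonneg hpos.le).symm
    set n := distance.toNat with hndef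
    have hnpos : 0 < n := by omega
    rw [if_neg (by omega)]
    rw [hn, foldl_eq_itN, itN_eq]
    have hq : PySem.Int.floordiv ((n : Nat) : Int) 100 = ((n / 100 : Nat) : Int) := by
      exact_mod_cast PySem.Int.floordiv_natCast n 100
    have hr : PySem.Int.mod ((n : Nat) : Int) 100 = ((n % 100 : Nat) : Int) := by
      exact_mod_cast PySem.Int.mod_natCast n 100
    rw [hq, hr, if_neg (by omega)]
    have hcnt : countZeros current d n
        = ((n / 100 : Nat) : Int) * countZeros current d 100
          + countZeros current d ((((n % 100 : Nat) : Int)).toNat) := by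
      have : n = 100 * (n / 100) + n % 100 := (Nat.div_add_mod' n 100).symm ▸ by omega
      rw [show (((n % 100 : Nat) : Int)).toNat = n % 100 by omega]
      calc countZeros current d n = countZeros current d (100 * (n / 100) + n % 100) := by rw [← this]
        _ = _ := countZeros_decompose current d (n / 100) (n % 100)
    rw [PySem.Int.mod_eq_emod_of_pos (by norm_num : (0:Int) < 100)]
    simp [hcnt]
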